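-- pv_equiv track=rewrite | github.com/fflorey/advent_of_code_2024 | 20/20b-not-working.py | remove_walls_within_radius
-- ===== SOURCE A (Python) =====
-- def remove_walls_within_radius(maze, point, radius):
--     rows, cols = len(maze), len(maze[0])
--     for row in range(rows):
--         for col in range(cols):
--             if maze[row][col] == '#':
--                 distance = abs(row - point[0]) + abs(col - point[1])
--                 if distance <= radius:
--                     maze[row][col] = '.'
--     return maze
-- ===== SOURCE B (Python) =====
-- # B: visit only the rows of the Manhattan diamond around `point` and clear each
-- # row's affected column interval with one slice assignment, instead of scanning
-- # every cell and testing its distance.  Mutates `maze` in place like A.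
-- def remove_walls_within_radius(maze, point, radius):
--     rows, cols = len(maze), len(maze[0])
--     pr, pc = point
--     for r in range(max(0, pr - radius), min(rows, pr + radius + 1)):
--         rem = radius - abs(r - pr)
--         lo = max(0, pc - rem)
--         hi = max(lo, min(cols, pc + rem + 1))
--         row = maze[r]
--         row[lo:hi] = ['.' if ch == '#' else ch for ch in row[lo:hi]]
--     return maze
-- ===== Notes on version B (the rewrite author's own statement) =====
-- stated objective: alternative
-- what changed: Instead of scanning every cell of the maze and testing its Manhattan distance, B visits only the rows of the Manhattan diamond around point and, per row, rewrites the affected column interval with a single slice assignment (clearing every '#' in the slice unconditionally); this touches O(min(radius,rows)*min(radius,cols)) cells instead of all rows*cols.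
import Mathlib
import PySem

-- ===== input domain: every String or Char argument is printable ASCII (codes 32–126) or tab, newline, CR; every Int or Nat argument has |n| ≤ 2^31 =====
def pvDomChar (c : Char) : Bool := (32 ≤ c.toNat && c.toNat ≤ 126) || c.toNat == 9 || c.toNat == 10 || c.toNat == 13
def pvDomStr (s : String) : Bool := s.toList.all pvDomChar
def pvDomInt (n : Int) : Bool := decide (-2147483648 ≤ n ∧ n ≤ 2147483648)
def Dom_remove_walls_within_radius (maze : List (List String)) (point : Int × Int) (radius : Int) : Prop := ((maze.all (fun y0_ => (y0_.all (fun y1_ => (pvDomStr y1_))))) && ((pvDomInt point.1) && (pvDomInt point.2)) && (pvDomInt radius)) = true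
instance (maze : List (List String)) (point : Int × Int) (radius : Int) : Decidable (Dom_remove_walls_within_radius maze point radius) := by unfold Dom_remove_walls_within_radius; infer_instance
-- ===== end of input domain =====

-- B visits only the rows of the Manhattan diamond around `point` and clears each row's
-- affected column interval with one slice assignment, instead of scanning every cell and
-- testing its distance. Both Pythons mutate `maze` in place in the same way; the
-- equivalence proved here is about the returned value.

-- ===== PORT A =====
-- inner-loop body of A: one step of `for col in range(cols)` at a fixed `row`
def stepCellA (point : Int × Int) (radius : Int) (row : Nat)
    (mz : List (List String)) (col : Nat) : List (List String) :=
  match mz[row]? with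
  | none => mz
  | some ln =>
    match ln[col]? with
    | none => mz
    | some v =>
      if v = "#" then
        if |(row : Int) - point.1| + |(col : Int) - point.2| ≤ radius then
          mz.set row (ln.set col ".")
        else mz
      else mz

-- outer-loop body of A: one step of `for row in range(rows)`
def stepRowA (point : Int × Int) (radius : Int) (cols : Nat)
    (mz : List (List String)) (row : Nat) : List (List String) :=
  (List.range cols).foldl (stepCellA point radius row) mz

def remove_walls_within_radius (maze : List (List String)) (point : Int × Int) (radius : Int) : List (List String) :=
  match maze with
  | [] => []  -- Python: `len(maze[0])` raises IndexError here; outside Pre_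
  | r0 :: _ => (List.range maze.length).foldl (stepRowA point radius r0.length) maze

-- ===== PORT B =====
-- `row[lo:hi] = ['.' if ch == '#' else ch for ch in row[lo:hi]]`; exact for 0 ≤ lo ≤ hi,
-- which B's clamping guarantees (Python slices clamp to the list length, as take/drop do)
def clearSeg (ln : List String) (lo hi : Int) : List String :=
  ln.take lo.toNat
    ++ ((ln.drop lo.toNat).take (hi - lo).toNat).map (fun ch => if ch = "#" then "." else ch)
    ++ ln.drop hi.toNat

-- loop body of B: one step of `for r in range(max(0, pr - radius), min(rows, pr + radius + 1))`
def stepRowB (point : Int × Int) (radius cols : Int)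
    (mz : List (List String)) (r : Int) : List (List String) :=
  let rem := radius - |r - point.1|
  let lo := max 0 (point.2 - rem)
  let hi := max lo (min cols (point.2 + rem + 1))
  match mz[r.toNat]? with
  | none => mz  -- unreachable: r is always a valid row index
  | some ln => mz.set r.toNat (clearSeg ln lo hi)

def remove_walls_within_radius_alt (maze : List (List String)) (point : Int × Int) (radius : Int) : List (List String) :=
  match maze with
  | [] => []  -- Python: `len(maze[0])` raises IndexError here; outside Pre_
  | r0 :: _ =>
    (PySem.List.pyRange (max 0 (point.1 - radius)) (min (maze.length : Int) (point.1 + radius + 1)) 1).foldl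
      (stepRowB point radius (r0.length : Int)) maze

-- ===== PRECONDITION & SPEC =====
-- Pre_: exactly the inputs on which Python A returns normally; A raises IndexError iff the maze
-- is empty (`len(maze[0])`) or some row is shorter than row 0 (`maze[row][col]` with
-- col < len(maze[0])). B raises only on the empty maze, a subset of these inputs.
def Pre_remove_walls_within_radius (maze : List (List String)) (point : Int × Int) (radius : Int) : Prop :=
  maze ≠ [] ∧ ∀ row ∈ maze, maze.headI.length ≤ row.length
instance (maze : List (List String)) (point : Int × Int) (radius : Int) : Decidable (Pre_remove_walls_within_radius maze point radius) := by unfold Pre_remove_walls_within_radius; infer_instance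

def pvWitness_remove_walls_within_radius : List (List String) × (Int × Int) × Int :=
  ([["#", "."], ["#", "#"]], ((0 : Int), (1 : Int)), (1 : Int))

def Spec_remove_walls_within_radius (maze : List (List String)) (point : Int × Int) (radius : Int) (out : List (List String)) : Prop := out = remove_walls_within_radius_alt maze point radius
instance (maze : List (List String)) (point : Int × Int) (radius : Int) (out : List (List String)) : Decidable (Spec_remove_walls_within_radius maze point radius out) := by unfold Spec_remove_walls_within_radius; infer_instance

-- ===== CLAIM (what is proved, stated in full; the proofs are below) =====
def Claim_equal_remove_walls_within_radius : Prop := ∀ (maze : List (List String)) (point : Int × Int) (radius : Int), Dom_remove_walls_within_radius maze point radius → Pre_remove_walls_within_radius maze point radius → Spec_remove_walls_within_radius maze point radius (remove_walls_within_radius maze point radius)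

-- ===== LEMMAS AND PROOFS =====
-- Plan: characterise A's nested fold pointwise — each cell update is `applyAt`, a fold of
-- `applyAt` over a duplicate-free index list leaves index j at the per-cell update iff
-- j is in the list — and show that per row, A's distance test clears exactly the column
-- interval B's `clearSeg` rewrites.

def applyAt {α : Type} (f : Nat → α → α) (l : List α) (c : Nat) : List α :=
  match l[c]? with
  | none => l
  | some v => l.set c (f c v)

theorem applyAt_getElem? {α : Type} (f : Nat → α → α) (l : List α) (c j : Nat) :
    (applyAt f l c)[j]? = if j = c then (l[j]?).map (f j) else l[j]? := by
  unfold applyAt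
  cases hv : l[c]? with
  | none =>
    by_cases hj : j = c
    · subst hj; simp [hv]
    · simp [hj]
  | some v =>
    have hlt : c < l.length := (List.getElem?_eq_some_iff.mp hv).1
    by_cases hj : j = c
    · subst hj
      rw [if_pos rfl, List.getElem?_set_self hlt, hv, Option.map_some]
    · rw [if_neg hj, List.getElem?_set_ne (fun h => hj h.symm)]

theorem foldl_applyAt {α : Type} (f : Nat → α → α) :
    ∀ (cs : List Nat) (l : List α) (j : Nat), cs.Nodup →
      (cs.foldl (applyAt f) l)[j]? = if j ∈ cs then (l[j]?).map (f j) else l[j]? := by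
  intro cs
  induction cs with
  | nil => intro l j _; simp
  | cons c cs ih =>
    intro l j hnd
    obtain ⟨hc, hnd'⟩ := List.nodup_cons.mp hnd
    simp only [List.foldl_cons]
    rw [ih _ j hnd']
    by_cases hj : j = c
    · subst hj
      rw [if_neg hc, applyAt_getElem?, if_pos rfl, if_pos (List.mem_cons_self)]
    · rw [applyAt_getElem?, if_neg hj]
      by_cases hmem : j ∈ cs
      · rw [if_pos hmem, if_pos (List.mem_cons_of_mem _ hmem)]
      · rw [if_neg hmem, if_neg (by simp [hj, hmem])]

def cellA (point : Int × Int) (radius : Int) (row : Nat) (c : Nat) (v : String) : String :=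
  if v = "#" then
    if |(row : Int) - point.1| + |(c : Int) - point.2| ≤ radius then "." else v
  else v

theorem stepCellA_eq (point : Int × Int) (radius : Int) (row : Nat)
    (mz : List (List String)) (col : Nat) :
    stepCellA point radius row mz col =
      (mz[row]?).elim mz (fun ln => mz.set row (applyAt (cellA point radius row) ln col)) := by
  unfold stepCellA applyAt cellA
  cases hr : mz[row]? with
  | none => rfl
  | some ln =>
    obtain ⟨hrl, hre⟩ := List.getElem?_eq_some_iff.mp hr
    subst hre
    simp only [Option.elim_some]
    cases hc : mz[row][col]? with
    | none =>
      simp only [hc]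
      exact (List.set_getElem_self hrl).symm
    | some v =>
      obtain ⟨hcl, hce⟩ := List.getElem?_eq_some_iff.mp hc
      simp only [hc]
      split_ifs with h1 h2
      · rfl
      · rw [← hce, List.set_getElem_self, List.set_getElem_self]
      · rw [← hce, List.set_getElem_self, List.set_getElem_self]

theorem foldl_setAt {α ι : Type} (r : Nat) (pos : ι → Nat) (f : Nat → α → α)
    (step : List (List α) → ι → List (List α))
    (hstep : ∀ mz i, step mz i =
      (mz[r]?).elim mz (fun ln => mz.set r (applyAt f ln (pos i)))) :
    ∀ (cs : List ι) (mz : List (List α)),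
      cs.foldl step mz =
        (mz[r]?).elim mz (fun ln => mz.set r (cs.foldl (fun l i => applyAt f l (pos i)) ln)) := by
  intro cs
  induction cs with
  | nil =>
    intro mz
    cases hr : mz[r]? with
    | none => rfl
    | some ln =>
      obtain ⟨hrl, hre⟩ := List.getElem?_eq_some_iff.mp hr
      subst hre
      simp only [Option.elim_some, List.foldl_nil]
      exact (List.set_getElem_self hrl).symm
  | cons i cs ih =>
    intro mz
    simp only [List.foldl_cons]
    rw [hstep mz i]
    cases hr : mz[r]? with
    | none =>
      simp only [Option.elim_none]
      rw [ih mz, hr]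
      rfl
    | some ln =>
      obtain ⟨hrl, hre⟩ := List.getElem?_eq_some_iff.mp hr
      subst hre
      simp only [Option.elim_some]
      rw [ih (mz.set r (applyAt f mz[r] (pos i))),
        List.getElem?_set_self (by simpa using hrl)]
      simp only [Option.elim_some]
      rw [List.set_set]

def lineA (point : Int × Int) (radius : Int) (cols : Nat) (row : Nat) (ln : List String) : List String :=
  (List.range cols).foldl (applyAt (cellA point radius row)) ln

theorem stepRowA_eq (point : Int × Int) (radius : Int) (cols : Nat)
    (mz : List (List String)) (row : Nat) :
    stepRowA point radius cols mz row = applyAt (lineA point radius cols) mz row := by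
  unfold stepRowA
  rw [foldl_setAt row (fun c => c) (cellA point radius row) (stepCellA point radius row)
    (by intro mz c; exact stepCellA_eq point radius row mz c)]
  unfold applyAt lineA
  cases mz[row]? <;> rfl

-- pointwise description of B's slice assignment (for 0 ≤ lo ≤ hi)
-- pointwise description of a slice rewrite at Nat indices a, a+m
theorem seg_getElem? (f : String → String) (ln : List String) (a m j : Nat) :
    (ln.take a ++ ((ln.drop a).take m).map f ++ ln.drop (a + m))[j]? =
      if a ≤ j ∧ j < a + m then (ln[j]?).map f else ln[j]? := by
  simp only [List.getElem?_append, List.length_append, List.length_take, List.length_map,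
    List.length_drop, List.getElem?_take, List.getElem?_map, List.getElem?_drop]
  by_cases hS : j < min a ln.length + min m (ln.length - a)
  · rw [if_pos hS]
    by_cases h1 : j < min a ln.length
    · rw [if_pos h1, if_pos (by omega), if_neg (by omega)]
    · rw [if_neg h1, if_pos (by omega), if_pos (by omega)]
      have hidx : a + (j - min a ln.length) = j := by omega
      rw [hidx]
  · rw [if_neg hS]
    by_cases hjl : j < ln.length
    · have h : a + m + (j - (min a ln.length + min m (ln.length - a))) = j := by omega
      rw [h, if_neg (by omega)]
    · have hn : ln[j]? = none := List.getElem?_eq_none (by omega)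
      rw [List.getElem?_eq_none (l := ln) (by omega), hn]
      split <;> simp

-- pointwise description of B's slice assignment (for 0 ≤ lo ≤ hi)
theorem clearSeg_getElem? (ln : List String) (lo hi : Int) (h0 : 0 ≤ lo) (hlh : lo ≤ hi) (j : Nat) :
    (clearSeg ln lo hi)[j]? =
      if lo ≤ (j : Int) ∧ (j : Int) < hi then
        (ln[j]?).map (fun ch => if ch = "#" then "." else ch)
      else ln[j]? := by
  have hhi : hi.toNat = lo.toNat + (hi - lo).toNat := by omega
  have hcond : (lo ≤ (j : Int) ∧ (j : Int) < hi)
      ↔ (lo.toNat ≤ j ∧ j < lo.toNat + (hi - lo).toNat) := by omega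
  unfold clearSeg
  rw [hhi, seg_getElem?]
  by_cases h : lo ≤ (j : Int) ∧ (j : Int) < hi
  · rw [if_pos h, if_pos (hcond.mp h)]
  · rw [if_neg h, if_neg (fun hh => h (hcond.mpr hh))]

-- per row: A's distance-tested full scan equals B's interval rewrite (identity off the diamond)
theorem lineA_eq_clearSeg (point : Int × Int) (radius : Int) (cols : Nat) (row : Nat) (ln : List String) :
    lineA point radius cols row ln =
      if max 0 (point.1 - radius) ≤ (row : Int) ∧ (row : Int) < point.1 + radius + 1 then
        clearSeg ln (max 0 (point.2 - (radius - |(row : Int) - point.1|)))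
          (max (max 0 (point.2 - (radius - |(row : Int) - point.1|)))
            (min (cols : Int) (point.2 + (radius - |(row : Int) - point.1|) + 1)))
      else ln := by
  by_cases hrow : max 0 (point.1 - radius) ≤ (row : Int) ∧ (row : Int) < point.1 + radius + 1
  · rw [if_pos hrow]
    apply List.ext_getElem?
    intro c
    unfold lineA
    rw [foldl_applyAt _ _ _ _ List.nodup_range,
      clearSeg_getElem? _ _ _ (le_max_left _ _) (le_max_left _ _)]
    simp only [List.mem_range]
    cases hv : ln[c]? with
    | none => simp
    | some v =>
      simp only [Option.map_some]
      unfold cellA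
      by_cases hc : c < cols
      · rw [if_pos hc]
        by_cases hsharp : v = "#"
        · simp only [if_pos hsharp]
          rcases abs_cases ((row : Int) - point.1) with ⟨h1, h2⟩ | ⟨h1, h2⟩ <;>
            rcases abs_cases ((c : Int) - point.2) with ⟨h3, h4⟩ | ⟨h3, h4⟩ <;>
            rw [h1] <;> split_ifs <;> first | rfl | (exfalso; rw [h1] at * ; omega)
        · simp only [if_neg hsharp]
          split_ifs <;> rfl
      · rw [if_neg hc]
        have hclen : c < ln.length := (List.getElem?_eq_some_iff.mp hv).1
        rw [if_neg (by
          rintro ⟨hl, hr⟩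
          rcases abs_cases ((row : Int) - point.1) with ⟨h1, h2⟩ | ⟨h1, h2⟩ <;>
            rw [h1] at hl hr <;> omega)]
  · rw [if_neg hrow]
    apply List.ext_getElem?
    intro c
    unfold lineA
    rw [foldl_applyAt _ _ _ _ List.nodup_range]
    simp only [List.mem_range]
    by_cases hc : c < cols
    · rw [if_pos hc]
      cases hv : ln[c]? with
      | none => rfl
      | some v =>
        simp only [Option.map_some]
        unfold cellA
        have hc2 := abs_nonneg ((c : Int) - point.2)
        rcases abs_cases ((row : Int) - point.1) with ⟨h1, h2⟩ | ⟨h1, h2⟩ <;>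
          rw [h1] <;> split_ifs <;> first | rfl | (exfalso; omega)
    · rw [if_neg hc]

theorem map_toNat_pyRange (a b : Int) (ha : 0 ≤ a) :
    (PySem.List.pyRange a b 1).map Int.toNat
      = (List.range (b - a).toNat).map (fun k => a.toNat + k) := by
  rw [PySem.List.pyRange_one, List.map_map]
  congr 1
  funext k
  simp only [Function.comp_apply]
  omega

theorem nodup_map_toNat_pyRange (a b : Int) (ha : 0 ≤ a) :
    ((PySem.List.pyRange a b 1).map Int.toNat).Nodup := by
  rw [map_toNat_pyRange a b ha]
  exact List.Nodup.map (fun x y h => by omega) List.nodup_range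

theorem mem_map_toNat_pyRange (a b : Int) (ha : 0 ≤ a) (j : Nat) :
    (j ∈ (PySem.List.pyRange a b 1).map Int.toNat) ↔ a ≤ (j : Int) ∧ (j : Int) < b := by
  rw [map_toNat_pyRange a b ha]
  simp only [List.mem_map, List.mem_range]
  constructor
  · rintro ⟨k, hk, rfl⟩
    constructor <;> [push_cast; push_cast] <;> omega
  · intro ⟨h1, h2⟩
    exact ⟨j - a.toNat, by omega, by omega⟩

def lineB (point : Int × Int) (radius : Int) (cols : Int) (j : Nat) (ln : List String) : List String :=
  clearSeg ln (max 0 (point.2 - (radius - |(j : Int) - point.1|)))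
    (max (max 0 (point.2 - (radius - |(j : Int) - point.1|)))
      (min cols (point.2 + (radius - |(j : Int) - point.1|) + 1)))

theorem stepRowB_eq (point : Int × Int) (radius cols : Int)
    (mz : List (List String)) (r : Int) (hr0 : 0 ≤ r) :
    stepRowB point radius cols mz r = applyAt (lineB point radius cols) mz r.toNat := by
  have hcast : ((r.toNat : Int)) = r := Int.toNat_of_nonneg hr0
  unfold stepRowB applyAt lineB
  simp only [hcast]
  cases mz[r.toNat]? <;> rfl

theorem ports_agree (maze : List (List String)) (point : Int × Int) (radius : Int) :
    remove_walls_within_radius maze point radius = remove_walls_within_radius_alt maze point radius := by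
  cases maze with
  | nil => rfl
  | cons r0 rest =>
    show (List.range (r0 :: rest).length).foldl (stepRowA point radius r0.length) (r0 :: rest)
      = (PySem.List.pyRange (max 0 (point.1 - radius))
          (min ((r0 :: rest).length : Int) (point.1 + radius + 1)) 1).foldl
          (stepRowB point radius (r0.length : Int)) (r0 :: rest)
    have hlo : (0 : Int) ≤ max 0 (point.1 - radius) := le_max_left _ _
    have hstepA : stepRowA point radius r0.length = applyAt (lineA point radius r0.length) :=
      funext fun mz => funext fun row => stepRowA_eq point radius r0.length mz row
    rw [hstepA]
    have hstepB : ∀ (mz : List (List String)) (r : Int),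
        r ∈ PySem.List.pyRange (max 0 (point.1 - radius))
            (min ((r0 :: rest).length : Int) (point.1 + radius + 1)) 1 →
        stepRowB point radius (r0.length : Int) mz r
          = applyAt (lineB point radius (r0.length : Int)) mz r.toNat := by
      intro mz r hr
      exact stepRowB_eq point radius (r0.length : Int) mz r
        (le_trans hlo (PySem.List.mem_pyRange_one.mp hr).1)
    rw [PySem.List.foldl_congr_mem _ _ _ _ hstepB]
    conv_rhs => rw [← List.foldl_map (f := Int.toNat)
      (g := applyAt (lineB point radius (r0.length : Int)))]
    apply List.ext_getElem?
    intro j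
    rw [foldl_applyAt _ _ _ _ List.nodup_range,
      foldl_applyAt _ _ _ _ (nodup_map_toNat_pyRange _ _ hlo)]
    simp only [List.mem_range, mem_map_toNat_pyRange _ _ hlo]
    cases hj : (r0 :: rest)[j]? with
    | none =>
      have hlen : (r0 :: rest).length ≤ j := List.getElem?_eq_none_iff.mp hj
      rw [if_neg (by omega), if_neg (by
        intro ⟨h1, h2⟩
        have : (j : Int) < ((r0 :: rest).length : Int) := lt_of_lt_of_le h2 (min_le_left _ _)
        omega)]
    | some ln =>
      have hjlen : j < (r0 :: rest).length := (List.getElem?_eq_some_iff.mp hj).1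
      rw [if_pos hjlen, Option.map_some, Option.map_some, lineA_eq_clearSeg]
      by_cases hcond : max 0 (point.1 - radius) ≤ (j : Int) ∧ (j : Int) < point.1 + radius + 1
      · rw [if_pos hcond, if_pos ⟨hcond.1, lt_min (by omega) hcond.2⟩]
        rfl
      · rw [if_neg hcond, if_neg (by
          intro ⟨h1, h2⟩
          exact hcond ⟨h1, lt_of_lt_of_le h2 (min_le_right _ _)⟩)]

-- ===== VERDICT (by name: the statement is the Claim_ definition above) =====
theorem remove_walls_within_radius_spec : Claim_equal_remove_walls_within_radius := by
  intro maze point radius _ _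
  exact ports_agree maze point radius
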